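-- pv_equiv track=rewrite | github.com/Vruttant/neetcode-submissions | Data Structures & Algorithms/valid-sudoku/submission-1.py | areSubBoxValid
-- ===== SOURCE A (Python) =====
-- from collections import defaultdict
--
-- def areSubBoxValid(board):
--     sub_box_cache = defaultdict(set)
--     for i in range(9):
--         for j in range(9):
--             if board[i][j] ==".":
--                 continue
--             initial_length = len(sub_box_cache[(i // 3, j // 3)])
--             sub_box_cache[(i//3, j//3)].add(board[i][j])
--             final_length = len(sub_box_cache[(i // 3, j // 3)])
--
--             if final_length == initial_length:
--                 return False
--
--     return True
-- ===== SOURCE B (Python) =====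
-- def areSubBoxValid(board):
--     for i in range(9):
--         for j in range(9):
--             v = board[i][j]
--             if v == ".":
--                 continue
--             bi = i - i % 3
--             bj = j - j % 3
--             for pi in range(bi, bi + 3):
--                 for pj in range(bj, bj + 3):
--                     if (pi < i or (pi == i and pj < j)) and board[pi][pj] == v:
--                         return False
--     return True
-- ===== Notes on version B (the rewrite author's own statement) =====
-- stated objective: alternative
-- what changed: B drops A's defaultdict of per-box sets entirely: at each non-'.' cell it rescans the earlier cells of the same 3x3 sub-box (computed arithmetically from the cell's indices) for an equal value, keeping no auxiliary state.
import Mathlib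
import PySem

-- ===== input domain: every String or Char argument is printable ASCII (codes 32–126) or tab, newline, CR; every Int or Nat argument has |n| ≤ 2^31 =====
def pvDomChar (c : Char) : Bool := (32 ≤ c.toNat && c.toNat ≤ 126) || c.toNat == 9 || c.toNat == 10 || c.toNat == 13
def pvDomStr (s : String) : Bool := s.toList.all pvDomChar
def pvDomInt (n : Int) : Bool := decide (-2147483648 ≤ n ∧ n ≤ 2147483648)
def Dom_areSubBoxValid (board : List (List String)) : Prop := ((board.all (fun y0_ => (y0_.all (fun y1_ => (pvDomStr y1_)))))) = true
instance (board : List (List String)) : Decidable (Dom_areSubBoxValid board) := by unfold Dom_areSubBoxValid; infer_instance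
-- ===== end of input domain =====

-- B drops A's dict of per-box sets entirely: at each non-'.' cell it rescans the earlier cells of
-- the same sub-box for an equal value (no auxiliary state, same cell order as A).

-- ===== PORT A =====
def areSubBoxValidGo (board : List (List String)) :
    List (Int × Int) → PySem.Dict (Int × Int) (PySem.Set String) → Bool
  | [], _ => true
  | (i, j) :: rest, cache =>
    match PySem.List.pyGet? board i with
    | none => false          -- board[i] raises IndexError in Python
    | some row =>
      match PySem.List.pyGet? row j with
      | none => false        -- board[i][j] raises IndexError in Python
      | some v =>
        if v = "." then areSubBoxValidGo board rest cache
        else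
          let k := (PySem.Int.floordiv i 3, PySem.Int.floordiv j 3)
          let s := cache.getD k PySem.Set.empty
          let initialLength := PySem.Set.len s
          let s' := PySem.Set.add s v
          let finalLength := PySem.Set.len s'
          if finalLength = initialLength then false
          else areSubBoxValidGo board rest (cache.insert k s')

def areSubBoxValid (board : List (List String)) : Bool :=
  areSubBoxValidGo board
    ((PySem.List.pyRange 0 9 1).flatMap (fun i => (PySem.List.pyRange 0 9 1).map (fun j => (i, j))))
    PySem.Dict.empty

-- ===== PORT B =====
-- Source B's inner double loop 'for pi in range(bi, bi + 3): for pj in range(bj, bj + 3)'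
def pvBoxScan (i j : Int) : List (Int × Int) :=
  (PySem.List.pyRange (i - PySem.Int.mod i 3) (i - PySem.Int.mod i 3 + 3) 1).flatMap (fun pi =>
    (PySem.List.pyRange (j - PySem.Int.mod j 3) (j - PySem.Int.mod j 3 + 3) 1).map (fun pj => (pi, pj)))

def areSubBoxValidAltGo (board : List (List String)) : List (Int × Int) → Bool
  | [] => true
  | (i, j) :: rest =>
    match PySem.List.pyGet? board i with
    | none => false          -- board[i] raises IndexError in Python
    | some row =>
      match PySem.List.pyGet? row j with
      | none => false        -- board[i][j] raises IndexError in Python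
      | some v =>
        if v = "." then areSubBoxValidAltGo board rest
        else
          -- 'if (pi < i or (pi == i and pj < j)) and board[pi][pj] == v: return False';
          -- board[pi][pj] is an already-visited cell, so its lookup cannot raise when reached
          if (pvBoxScan i j).any (fun c =>
              (decide (c.1 < i ∨ (c.1 = i ∧ c.2 < j))) &&
              (match PySem.List.pyGet? board c.1 with
               | none => false
               | some prow =>
                 match PySem.List.pyGet? prow c.2 with
                 | none => false
                 | some w => w == v))
          then false
          else areSubBoxValidAltGo board rest

def areSubBoxValid_alt (board : List (List String)) : Bool :=
  areSubBoxValidAltGo board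
    ((PySem.List.pyRange 0 9 1).flatMap (fun i => (PySem.List.pyRange 0 9 1).map (fun j => (i, j))))

def pvLookup (board : List (List String)) (p : Int × Int) : Option String :=
  match PySem.List.pyGet? board p.1 with
  | none => none
  | some row => PySem.List.pyGet? row p.2

def pvVal (f : Int × Int → Option String) (p : Int × Int) : Option String :=
  match f p with
  | none => none
  | some v => if v = "." then none else some v

def pvKey (p : Int × Int) : Int × Int := (PySem.Int.floordiv p.1 3, PySem.Int.floordiv p.2 3)

def pvCells : List (Int × Int) :=
  (PySem.List.pyRange 0 9 1).flatMap (fun i => (PySem.List.pyRange 0 9 1).map (fun j => (i, j)))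

-- ===== PRECONDITION & SPEC =====
-- Pre_ holds exactly when Python A returns normally: either all 81 indexed cells exist, or the
-- scan finds a duplicated sub-box value at a cell all of whose predecessors (scan order) exist.
def Pre_areSubBoxValid (board : List (List String)) : Prop :=
  (∀ c ∈ pvCells, (pvLookup board c).isSome) ∨
  (∃ c ∈ pvCells,
    (∃ c' ∈ pvCells, (c'.1 < c.1 ∨ (c'.1 = c.1 ∧ c'.2 < c.2)) ∧ pvKey c' = pvKey c ∧
      pvVal (pvLookup board) c' = pvVal (pvLookup board) c ∧
      (pvVal (pvLookup board) c).isSome) ∧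
    ∀ c' ∈ pvCells, (c'.1 < c.1 ∨ (c'.1 = c.1 ∧ c'.2 < c.2) ∨ c' = c) →
      (pvLookup board c').isSome)
instance (board : List (List String)) : Decidable (Pre_areSubBoxValid board) := by
  unfold Pre_areSubBoxValid; infer_instance

def pvWitness_areSubBoxValid : List (List String) :=
  List.replicate 9 (List.replicate 9 ".")

def Spec_areSubBoxValid (board : List (List String)) (out : Bool) : Prop := out = areSubBoxValid_alt board
instance (board : List (List String)) (out : Bool) : Decidable (Spec_areSubBoxValid board out) := by unfold Spec_areSubBoxValid; infer_instance

-- ===== CLAIM (what is proved, stated in full; the proofs are below) =====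
def Claim_equal_areSubBoxValid : Prop := ∀ (board : List (List String)), Dom_areSubBoxValid board → Pre_areSubBoxValid board → Spec_areSubBoxValid board (areSubBoxValid board)

-- ===== LEMMAS AND PROOFS =====

def pvVs (f : Int × Int → Option String) (k : Int × Int) (ps : List (Int × Int)) : List String :=
  ps.filterMap (fun p => if pvKey p = k then pvVal f p else none)

def pvBoxes : List (Int × Int) :=
  (PySem.List.pyRange 0 3 1).flatMap (fun bi => (PySem.List.pyRange 0 3 1).map (fun bj => (bi, bj)))

def pvBoxCells (b : Int × Int) : List (Int × Int) :=
  (PySem.List.pyRange 0 3 1).flatMap (fun di =>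
    (PySem.List.pyRange 0 3 1).map (fun dj => (b.1 * 3 + di, b.2 * 3 + dj)))

lemma len_add_eq_iff (s : PySem.Set String) (v : String) :
    PySem.Set.len (PySem.Set.add s v) = PySem.Set.len s ↔ v ∈ s := by
  rw [PySem.Set.add_eq_ite]
  split_ifs with h
  · simpa using h
  · simp only [PySem.Set.len, List.length_append, List.length_singleton]
    constructor
    · intro he
      exfalso
      omega
    · intro hv
      exact absurd hv h

lemma key_mem : ∀ p ∈ pvCells, pvKey p ∈ pvBoxes := by decide

lemma box_sub : ∀ b ∈ pvBoxes, ∀ c ∈ pvBoxCells b, c ∈ pvCells := by decide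

lemma boxScan_eq : ∀ p ∈ pvCells, pvBoxScan p.1 p.2 = pvBoxCells (pvKey p) := by decide

lemma keyFact : ∀ n ∈ List.range 81, ∀ c' ∈ pvCells,
    ((c' ∈ pvCells.take n ∧ pvKey c' = pvKey (pvCells.getD n (0, 0))) ↔
      (c' ∈ pvBoxCells (pvKey (pvCells.getD n (0, 0))) ∧
        (c'.1 < (pvCells.getD n (0, 0)).1 ∨
          (c'.1 = (pvCells.getD n (0, 0)).1 ∧ c'.2 < (pvCells.getD n (0, 0)).2)))) := by
  set_option maxRecDepth 40000 in decide

lemma cond_iff (board : List (List String)) (pre suf : List (Int × Int)) (i j : Int) (v : String)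
    (h : pre ++ (i, j) :: suf = pvCells) (hdot : v ≠ ".") :
    ((pvBoxScan i j).any (fun c =>
        (decide (c.1 < i ∨ (c.1 = i ∧ c.2 < j))) &&
        (match PySem.List.pyGet? board c.1 with
         | none => false
         | some prow =>
           match PySem.List.pyGet? prow c.2 with
           | none => false
           | some w => w == v)) = true) ↔
      v ∈ pvVs (pvLookup board) (pvKey (i, j)) pre := by
  have hmemc : (i, j) ∈ pvCells := by
    rw [← h]
    exact List.mem_append_right _ List.mem_cons_self
  have hlen81 : pvCells.length = 81 := by decide
  have hn81 : pre.length < 81 := by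
    have := congrArg List.length h
    simp [hlen81] at this
    omega
  have hgetn : pvCells.getD pre.length (0, 0) = (i, j) := by
    rw [← h]
    simp [List.getD]
  have hpre : pvCells.take pre.length = pre := by
    rw [← h]
    exact List.take_left
  have hkf := keyFact pre.length (List.mem_range.2 hn81)
  rw [hgetn, hpre] at hkf
  have hmatch : ∀ c : Int × Int,
      ((match PySem.List.pyGet? board c.1 with
        | none => false
        | some prow =>
          match PySem.List.pyGet? prow c.2 with
          | none => false
          | some w => w == v) = true) ↔ pvLookup board c = some v := by
    intro c
    cases hr : PySem.List.pyGet? board c.1 with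
    | none => simp [pvLookup, hr]
    | some prow =>
      cases hw : PySem.List.pyGet? prow c.2 with
      | none => simp [pvLookup, hr, hw]
      | some w => simp [pvLookup, hr, hw, beq_iff_eq]
  rw [List.any_eq_true]
  constructor
  · rintro ⟨c', hc', hcnd⟩
    rw [boxScan_eq (i, j) hmemc] at hc'
    rw [Bool.and_eq_true, decide_eq_true_eq, hmatch c'] at hcnd
    obtain ⟨hlex, hlkp⟩ := hcnd
    have hc'cells : c' ∈ pvCells :=
      box_sub _ (key_mem (i, j) hmemc) _ hc'
    have hmem := (hkf c' hc'cells).2 ⟨hc', hlex⟩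
    rw [pvVs, List.mem_filterMap]
    refine ⟨c', hmem.1, ?_⟩
    rw [if_pos hmem.2]
    simp [pvVal, hlkp, hdot]
  · intro hv
    rw [pvVs, List.mem_filterMap] at hv
    obtain ⟨c', hc', heq⟩ := hv
    by_cases hk : pvKey c' = pvKey (i, j)
    · rw [if_pos hk] at heq
      have hlkp : pvLookup board c' = some v := by
        cases hl : pvLookup board c' with
        | none => simp [pvVal, hl] at heq
        | some w =>
          simp only [pvVal, hl] at heq
          by_cases hw : w = "."
          · simp [hw] at heq
          · simp only [if_neg hw, Option.some.injEq] at heq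
            rw [heq]
      have hc'cells : c' ∈ pvCells := by
        rw [← h]
        exact List.mem_append_left _ hc'
      have hbx := (hkf c' hc'cells).1 ⟨hc', hk⟩
      refine ⟨c', by rw [boxScan_eq (i, j) hmemc]; exact hbx.1, ?_⟩
      rw [Bool.and_eq_true, decide_eq_true_eq, hmatch c']
      exact ⟨hbx.2, hlkp⟩
    · rw [if_neg hk] at heq
      cases heq

lemma goAB (board : List (List String)) :
    ∀ (suf pre : List (Int × Int)) (cache : PySem.Dict (Int × Int) (PySem.Set String)),
      pre ++ suf = pvCells →
      (∀ k w, w ∈ cache.getD k PySem.Set.empty ↔ w ∈ pvVs (pvLookup board) k pre) →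
      areSubBoxValidGo board suf cache = areSubBoxValidAltGo board suf := by
  intro suf
  induction suf with
  | nil => intro pre cache _ _; rfl
  | cons p rest ih =>
    intro pre cache h hinv
    obtain ⟨i, j⟩ := p
    cases hrow : PySem.List.pyGet? board i with
    | none => simp only [areSubBoxValidGo, areSubBoxValidAltGo, hrow]
    | some row =>
      cases hv : PySem.List.pyGet? row j with
      | none => simp only [areSubBoxValidGo, areSubBoxValidAltGo, hrow, hv]
      | some v =>
        have hlk : pvLookup board (i, j) = some v := by simp [pvLookup, hrow, hv]
        by_cases hdot : v = "."
        · have hval : pvVal (pvLookup board) (i, j) = none := by simp [pvVal, hlk, hdot]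
          have hvs : ∀ k, pvVs (pvLookup board) k (pre ++ [(i, j)]) =
              pvVs (pvLookup board) k pre := by
            intro k
            simp [pvVs, List.filterMap_append, hval]
          simp only [areSubBoxValidGo, areSubBoxValidAltGo, hrow, hv, if_pos hdot]
          exact ih (pre ++ [(i, j)]) cache (by rw [List.append_assoc]; exact h)
            (fun k w => (hinv k w).trans (by rw [hvs k]))
        · have hval : pvVal (pvLookup board) (i, j) = some v := by simp [pvVal, hlk, hdot]
          have hkey : (PySem.Int.floordiv i 3, PySem.Int.floordiv j 3) = pvKey (i, j) := rfl
          have hcond := cond_iff board pre rest i j v h hdot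
          by_cases hP : v ∈ pvVs (pvLookup board) (pvKey (i, j)) pre
          · have hmem : v ∈ cache.getD (pvKey (i, j)) PySem.Set.empty := (hinv _ v).2 hP
            have hlen : PySem.Set.len (PySem.Set.add (cache.getD (pvKey (i, j)) PySem.Set.empty) v) =
                PySem.Set.len (cache.getD (pvKey (i, j)) PySem.Set.empty) :=
              (len_add_eq_iff _ _).2 hmem
            have hAfalse : areSubBoxValidGo board ((i, j) :: rest) cache = false := by
              simp only [areSubBoxValidGo, hrow, hv, if_neg hdot, hkey, hlen]
              simp
            have hBfalse : areSubBoxValidAltGo board ((i, j) :: rest) = false := by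
              simp only [areSubBoxValidAltGo, hrow, hv, if_neg hdot, hcond.2 hP]
              simp
            rw [hAfalse, hBfalse]
          · have hmem : v ∉ cache.getD (pvKey (i, j)) PySem.Set.empty :=
              fun hc => hP ((hinv _ v).1 hc)
            have hlen : ¬ PySem.Set.len (PySem.Set.add (cache.getD (pvKey (i, j)) PySem.Set.empty) v) =
                PySem.Set.len (cache.getD (pvKey (i, j)) PySem.Set.empty) := by
              rw [len_add_eq_iff]
              exact hmem
            have hany := fun hc => hP (hcond.1 hc)
            simp only [areSubBoxValidGo, areSubBoxValidAltGo, hrow, hv, if_neg hdot, hkey,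
              if_neg hlen, if_neg hany]
            have hadd : PySem.Set.add (cache.getD (pvKey (i, j)) PySem.Set.empty) v =
                cache.getD (pvKey (i, j)) PySem.Set.empty ++ [v] :=
              PySem.Set.add_of_not_mem hmem
            refine ih (pre ++ [(i, j)])
              (cache.insert (pvKey (i, j))
                (PySem.Set.add (cache.getD (pvKey (i, j)) PySem.Set.empty) v))
              (by rw [List.append_assoc]; exact h) (fun k w => ?_)
            by_cases hk : k = pvKey (i, j)
            · subst hk
              rw [PySem.Dict.getD_insert_self, hadd]
              have hvsk : pvVs (pvLookup board) (pvKey (i, j)) (pre ++ [(i, j)]) =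
                  pvVs (pvLookup board) (pvKey (i, j)) pre ++ [v] := by
                simp [pvVs, List.filterMap_append, hval]
              rw [hvsk]
              simp only [List.mem_append, List.mem_singleton]
              rw [← hinv (pvKey (i, j)) w]
            · have hgetN : (cache.insert (pvKey (i, j))
                  (PySem.Set.add (cache.getD (pvKey (i, j)) PySem.Set.empty) v)).getD k
                    PySem.Set.empty = cache.getD k PySem.Set.empty := by
                simp only [PySem.Dict.getD, PySem.Dict.get?_insert_of_ne _ _ hk]
              have hkne : ¬ pvKey (i, j) = k := fun hc => hk hc.symm
              have hvsk : pvVs (pvLookup board) k (pre ++ [(i, j)]) =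
                  pvVs (pvLookup board) k pre := by
                simp [pvVs, List.filterMap_append, hkne]
              rw [hgetN, hvsk]
              exact hinv k w

-- ===== VERDICT (by name: the statement is the Claim_ definition above) =====
theorem areSubBoxValid_spec : Claim_equal_areSubBoxValid := by
  -- the ports agree on every input, so the precondition is not needed beyond introducing it
  intro board _hdom _hpre
  unfold Spec_areSubBoxValid
  show areSubBoxValidGo board pvCells PySem.Dict.empty = areSubBoxValidAltGo board pvCells
  refine goAB board pvCells [] PySem.Dict.empty rfl (fun k w => ?_)
  have hempty : (PySem.Dict.empty :
      PySem.Dict (Int × Int) (PySem.Set String)).getD k PySem.Set.empty = PySem.Set.empty := rfl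
  rw [hempty]
  simp [pvVs, PySem.Set.empty]
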